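-- pv_equiv track=rewrite | github.com/ashutoshjoshi1/MINIROBO-HAMA | drivers/spectrometer.py | split_cycles
-- ===== SOURCE A (Python) =====
-- def split_cycles(max_ncy_per_meas, ncy):
--     """Splits a number of cycles into packs."""
--     if ncy <= 0:
--         return [], "0x0cy"
--     packs = []
--     while ncy > 0:
--         pack_size = min(ncy, max_ncy_per_meas)
--         packs.append(pack_size)
--         ncy -= pack_size
--
--     # Create packs info string
--     pack_counts = {}
--     for p in packs:
--         pack_counts[p] = pack_counts.get(p, 0) + 1
--     info = "+".join([f"{count}x{size}cy" for size, count in pack_counts.items()])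
--
--     return packs, info
-- ===== SOURCE B (Python) =====
-- def split_cycles(max_ncy_per_meas, ncy):
--     """Splits a number of cycles into packs (closed-form via divmod)."""
--     if ncy <= 0:
--         return [], "0x0cy"
--     q, r = divmod(ncy, max_ncy_per_meas)
--     packs = [max_ncy_per_meas] * q + ([r] if r else [])
--     parts = []
--     if q:
--         parts.append(f"{q}x{max_ncy_per_meas}cy")
--     if r:
--         parts.append(f"1x{r}cy")
--     return packs, "+".join(parts)
-- ===== Notes on version B (the rewrite author's own statement) =====
-- stated objective: simpler
-- what changed: replaces the chunk-peeling while-loop and the counting dict with a single divmod: packs = [max]*q + [r] and the info string assembled directly from q and r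
import Mathlib
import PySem

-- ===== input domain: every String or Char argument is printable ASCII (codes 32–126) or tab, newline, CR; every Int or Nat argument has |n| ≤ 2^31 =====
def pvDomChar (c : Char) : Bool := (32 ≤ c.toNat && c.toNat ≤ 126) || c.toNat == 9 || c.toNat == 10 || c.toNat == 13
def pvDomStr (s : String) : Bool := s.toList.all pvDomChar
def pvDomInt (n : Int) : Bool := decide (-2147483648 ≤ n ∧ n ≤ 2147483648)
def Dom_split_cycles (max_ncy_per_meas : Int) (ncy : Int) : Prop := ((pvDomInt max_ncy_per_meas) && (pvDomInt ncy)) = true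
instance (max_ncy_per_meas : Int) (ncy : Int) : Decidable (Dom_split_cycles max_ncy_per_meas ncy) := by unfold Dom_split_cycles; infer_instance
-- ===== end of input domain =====

-- B replaces A's chunk-peeling loop and counting dict by a single divmod; objective: simpler (speed not measured).


-- ===== PORT A =====
-- the while-loop; the fuel only makes the recursion total (inside Pre_, fuel = ncy.toNat suffices and the loop stops on ncy ≤ 0 by itself)
def splitLoopA (fuel : Nat) (m : Int) (ncy : Int) (packs : List Int) : List Int :=
  match fuel with
  | 0 => packs
  | fuel + 1 =>
    if 0 < ncy then
      let pack_size := min ncy m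
      splitLoopA fuel m (ncy - pack_size) (packs ++ [pack_size])
    else packs

def split_cycles (max_ncy_per_meas : Int) (ncy : Int) : List Int × String :=
  if ncy ≤ 0 then ([], "0x0cy")
  else
    let packs := splitLoopA ncy.toNat max_ncy_per_meas ncy []
    let pack_counts := packs.foldl (fun d p => d.insert p (d.getD p 0 + 1)) PySem.Dict.empty
    let info := PySem.Str.join "+"
      (pack_counts.items.map (fun sc => PySem.Int.toStr sc.2 ++ "x" ++ PySem.Int.toStr sc.1 ++ "cy"))
    (packs, info)

-- ===== PORT B =====
def split_cycles_alt (max_ncy_per_meas : Int) (ncy : Int) : List Int × String :=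
  if ncy ≤ 0 then ([], "0x0cy")
  else
    let q := PySem.Int.floordiv ncy max_ncy_per_meas
    let r := PySem.Int.mod ncy max_ncy_per_meas
    -- [max]*q: Python list repetition clamps a negative count to empty, as toNat does
    let packs := List.replicate q.toNat max_ncy_per_meas ++ (if r ≠ 0 then [r] else [])
    let parts :=
      (if q ≠ 0 then [PySem.Int.toStr q ++ "x" ++ PySem.Int.toStr max_ncy_per_meas ++ "cy"] else []) ++
      (if r ≠ 0 then ["1x" ++ PySem.Int.toStr r ++ "cy"] else [])
    (packs, PySem.Str.join "+" parts)

-- ===== PRECONDITION & SPEC =====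
-- Pre_ excludes exactly max_ncy_per_meas ≤ 0 with ncy > 0: there A's while-loop never terminates (no value is returned).
def Pre_split_cycles (max_ncy_per_meas : Int) (ncy : Int) : Prop :=
  ncy ≤ 0 ∨ 0 < max_ncy_per_meas
instance (max_ncy_per_meas : Int) (ncy : Int) : Decidable (Pre_split_cycles max_ncy_per_meas ncy) := by unfold Pre_split_cycles; infer_instance
def pvWitness_split_cycles : Int × Int := (3, 7)

def Spec_split_cycles (max_ncy_per_meas : Int) (ncy : Int) (out : List Int × String) : Prop := out = split_cycles_alt max_ncy_per_meas ncy
instance (max_ncy_per_meas : Int) (ncy : Int) (out : List Int × String) : Decidable (Spec_split_cycles max_ncy_per_meas ncy out) := by unfold Spec_split_cycles; infer_instance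

-- ===== CLAIM (what is proved, stated in full; the proofs are below) =====
def Claim_equal_split_cycles : Prop := ∀ (max_ncy_per_meas : Int) (ncy : Int), Dom_split_cycles max_ncy_per_meas ncy → Pre_split_cycles max_ncy_per_meas ncy → Spec_split_cycles max_ncy_per_meas ncy (split_cycles max_ncy_per_meas ncy)

-- ===== LEMMAS AND PROOFS =====

-- closed form of A's loop result (for 0 < m)
def pkSpec (m ncy : Int) : List Int :=
  List.replicate (ncy / m).toNat m ++ (if ncy % m ≠ 0 then [ncy % m] else [])

lemma splitLoopA_eq (m : Int) (hm : 0 < m) :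
    ∀ (fuel : Nat) (ncy : Int) (packs : List Int), 0 ≤ ncy → ncy.toNat ≤ fuel →
      splitLoopA fuel m ncy packs = packs ++ pkSpec m ncy := by
  intro fuel
  induction fuel with
  | zero =>
    intro ncy packs h0 hf
    have : ncy = 0 := by omega
    subst this
    simp [splitLoopA, pkSpec]
  | succ f ih =>
    intro ncy packs h0 hf
    by_cases hpos : 0 < ncy
    · simp only [splitLoopA, if_pos hpos]
      by_cases hle : ncy ≤ m
      · have hmin : min ncy m = ncy := min_eq_left hle
        rw [hmin]
        have : ncy - ncy = 0 := by omega
        rw [this, ih 0 _ le_rfl (by omega)]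
        have hpk0 : pkSpec m 0 = [] := by simp [pkSpec]
        rw [hpk0, List.append_nil]
        rcases eq_or_lt_of_le hle with heq | hlt
        · subst heq
          have hd : ncy / ncy = 1 := Int.ediv_self (by omega)
          have hmod : ncy % ncy = 0 := Int.emod_self
          simp [pkSpec, hd]
        · have hd : ncy / m = 0 := Int.ediv_eq_zero_of_lt h0 hlt
          have hmod : ncy % m = ncy := Int.emod_eq_of_lt h0 hlt
          have hne : ncy ≠ 0 := by omega
          simp [pkSpec, hd, hmod, hne]
      · have hmin : min ncy m = m := min_eq_right (by omega)
        rw [hmin, ih (ncy - m) _ (by omega) (by omega)]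
        have hdiv : ncy / m = (ncy - m) / m + 1 := by
          have := Int.add_mul_ediv_right (ncy - m) 1 (by omega : m ≠ 0)
          have h2 : ncy - m + 1 * m = ncy := by ring
          rw [h2] at this
          omega
        have hmod : ncy % m = (ncy - m) % m := by
          conv_lhs => rw [(by ring : ncy = ncy - m + 1 * m)]
          exact Int.add_mul_emod_self_right ..
        have hq0 : 0 ≤ (ncy - m) / m := Int.ediv_nonneg (by omega) (by omega)
        have hrep : (ncy / m).toNat = ((ncy - m) / m).toNat + 1 := by omega
        simp only [pkSpec, hrep, hmod, List.replicate_succ, List.append_assoc, List.cons_append,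
          List.nil_append]
    · have : ncy = 0 := by omega
      subst this
      simp [splitLoopA, pkSpec]

-- the counting fold over n copies of m, accumulator already holding (m, c)
lemma countFold_replicate (m : Int) (c : Int) :
    ∀ n : Nat, (List.replicate n m).foldl (fun d p => d.insert p (d.getD p 0 + 1))
        (PySem.Dict.mk [(m, c)]) = PySem.Dict.mk [(m, c + n)] := by
  intro n
  induction n generalizing c with
  | zero => simp
  | succ k ih =>
    rw [List.replicate_succ, List.foldl_cons]
    have hstep : (PySem.Dict.mk [(m, c)]).insert m ((PySem.Dict.mk [(m, c)]).getD m 0 + 1)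
        = PySem.Dict.mk [(m, c + 1)] := by
      simp [PySem.Dict.insert, PySem.Dict.getD, PySem.Dict.get?, PySem.Dict.contains]
    rw [hstep, ih]
    congr 1
    push_cast
    ring_nf

lemma countFold_replicate_from_empty (m : Int) (n : Nat) (hn : 0 < n) :
    (List.replicate n m).foldl (fun d p => d.insert p (d.getD p 0 + 1)) PySem.Dict.empty
      = PySem.Dict.mk [(m, (n : Int))] := by
  obtain ⟨k, rfl⟩ : ∃ k, n = k + 1 := ⟨n - 1, by omega⟩
  rw [List.replicate_succ, List.foldl_cons]
  have hstep : (PySem.Dict.empty : PySem.Dict Int Int).insert m (PySem.Dict.empty.getD m 0 + 1)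
      = PySem.Dict.mk [(m, 1)] := by
    simp [PySem.Dict.insert, PySem.Dict.getD, PySem.Dict.get?, PySem.Dict.contains,
      PySem.Dict.empty]
  rw [hstep, countFold_replicate]
  congr 1
  push_cast
  ring_nf

-- strings are compared through their character lists (String.append is kernel-opaque)
lemma frag_one (r : Int) :
    PySem.Int.toStr 1 ++ "x" ++ PySem.Int.toStr r ++ "cy" = "1x" ++ PySem.Int.toStr r ++ "cy" := by
  have h1 : PySem.Int.toStr 1 = "1" := rfl
  rw [h1]
  apply String.ext
  simp [String.toList_append]

theorem split_cycles_spec : Claim_equal_split_cycles := by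
  intro m ncy _hdom hpre
  unfold Spec_split_cycles split_cycles split_cycles_alt
  by_cases hn : ncy ≤ 0
  · simp [hn]
  · have hpos : 0 < ncy := by omega
    have hm : 0 < m := by rcases hpre with h | h <;> omega
    simp only [if_neg hn]
    have hloop := splitLoopA_eq m hm ncy.toNat ncy [] (by omega) le_rfl
    rw [hloop]
    simp only [List.nil_append]
    have hfd : PySem.Int.floordiv ncy m = ncy / m := PySem.Int.floordiv_eq_ediv_of_pos hm
    have hmd : PySem.Int.mod ncy m = ncy % m := PySem.Int.mod_eq_emod_of_pos hm
    have hq0 : 0 ≤ ncy / m := Int.ediv_nonneg (by omega) (by omega)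
    have hr0 : 0 ≤ ncy % m := Int.emod_nonneg _ (by omega)
    have hrm : ncy % m < m := Int.emod_lt_of_pos _ hm
    have hqr : ncy / m * m + ncy % m = ncy := Int.ediv_mul_add_emod ncy m
    refine Prod.ext ?_ ?_
    · -- the packs lists coincide by definition of pkSpec
      simp only [pkSpec, hfd, hmd]
    · -- the info strings
      simp only [pkSpec, hfd, hmd]
      by_cases hqz : ncy / m = 0
      · -- ncy < m: packs = [ncy % m], the remainder is ncy > 0
        have hrne : ncy % m ≠ 0 := by
          have h0 : ncy / m * m = 0 := by rw [hqz]; ring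
          intro h; omega
        simp only [hqz, Int.toNat_zero, List.replicate_zero, List.nil_append, if_pos hrne,
          if_neg (by simp : ¬ (0 : Int) ≠ 0), List.foldl_cons, List.foldl_nil,
          List.nil_append]
        have hstep : (PySem.Dict.empty : PySem.Dict Int Int).insert (ncy % m)
            (PySem.Dict.empty.getD (ncy % m) 0 + 1) = PySem.Dict.mk [(ncy % m, 1)] := by
          simp [PySem.Dict.insert, PySem.Dict.getD, PySem.Dict.get?, PySem.Dict.contains,
            PySem.Dict.empty]
        rw [hstep]
        simp only [List.map_cons, List.map_nil]
        rw [frag_one]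
      · have hqpos : 0 < ncy / m := by omega
        by_cases hrz : ncy % m = 0
        · -- exact multiple: packs = replicate q m
          simp only [hrz, if_neg (by simp : ¬ (0 : Int) ≠ 0), List.append_nil]
          rw [countFold_replicate_from_empty m (ncy / m).toNat (by omega)]
          simp only [List.map_cons, List.map_nil, if_pos hqz]
          rw [Int.toNat_of_nonneg hq0]
        · -- general case: packs = replicate q m ++ [r], with r ≠ m
          have hrne_m : ncy % m ≠ m := by omega
          simp only [if_pos hrz, List.foldl_append, List.foldl_cons, List.foldl_nil]
          rw [countFold_replicate_from_empty m (ncy / m).toNat (by omega)]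
          have hmr : ¬ m = ncy % m := by omega
          have hins : (PySem.Dict.mk [(m, ((ncy / m).toNat : Int))]).insert (ncy % m)
              ((PySem.Dict.mk [(m, ((ncy / m).toNat : Int))]).getD (ncy % m) 0 + 1)
              = PySem.Dict.mk [(m, ((ncy / m).toNat : Int)), (ncy % m, 1)] := by
            simp [PySem.Dict.insert, PySem.Dict.getD, PySem.Dict.get?, PySem.Dict.contains,
              hmr]
          rw [hins]
          simp only [List.map_cons, List.map_nil, if_pos hqz]
          rw [frag_one]
          rw [Int.toNat_of_nonneg hq0]
          rfl
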